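-- pv_equiv track=rewrite | github.com/lucastepper/reaction_coordinates | reaction_coordinate_base_mda.py | idxs_to_str
-- ===== SOURCE A (Python) =====
-- def idxs_to_str(idxs):
--     """ Convert a set of indexes to a string containing the indexes comma separated.
--     If more than 2 indexes are consecutive, convert them into a range of the from
--     start-end (inclusve on both sides). This format is accepted by plumed for
--     atom selection. Assumes indexes are zero bases and increments them by one.
--     Arguments:
--         idxs (iterable of ints) Indexes. """
--
--     # items are either ints for single idxs or strings for ranges
--     items = []
--     idxs = list(idxs)
--     # increment idxs for mdtraj -> plumed conversion
--     idxs = sorted([int(x) + 1 for x in idxs])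
--     while len(idxs) > 0:
--         n_consecutive = 0
--         for i in range(len(idxs) - 1):
--             if idxs[i] + 1 != idxs[i + 1]:
--                 break
--             n_consecutive += 1
--         if n_consecutive > 1:
--             items.append((idxs[0], idxs[n_consecutive]))
--             for __ in range(n_consecutive + 1):
--                 idxs.pop(0)
--         else:
--             items.append(idxs.pop(0))
--     # convert ranges to idx_start-idxs_end, ints to strings, join by comma
--     return ','.join([str(x) if isinstance(x, int) else f'{x[0]}-{x[1]}' for x in items])
-- ===== SOURCE B (Python) =====
-- def idxs_to_str(idxs):
--     xs = sorted(int(x) + 1 for x in idxs)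
--     runs = []  # maximal consecutive runs as [start, end], built in one pass
--     for v in xs:
--         if runs and runs[-1][1] + 1 == v:
--             runs[-1][1] = v
--         else:
--             runs.append([v, v])
--     parts = []
--     for a, b in runs:
--         if b - a >= 2:
--             parts.append(f"{a}-{b}")
--         else:
--             for v in range(a, b + 1):
--                 parts.append(str(v))
--     return ",".join(parts)
-- ===== Notes on version B (the rewrite author's own statement) =====
-- stated objective: faster
-- what changed: Replaced A's quadratic rescan-and-pop(0) loop (which rescans the leading run and pops elements one by one from the front) with a single linear pass over the sorted list that builds maximal consecutive runs in one fold and then formats each run.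
import Mathlib
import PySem

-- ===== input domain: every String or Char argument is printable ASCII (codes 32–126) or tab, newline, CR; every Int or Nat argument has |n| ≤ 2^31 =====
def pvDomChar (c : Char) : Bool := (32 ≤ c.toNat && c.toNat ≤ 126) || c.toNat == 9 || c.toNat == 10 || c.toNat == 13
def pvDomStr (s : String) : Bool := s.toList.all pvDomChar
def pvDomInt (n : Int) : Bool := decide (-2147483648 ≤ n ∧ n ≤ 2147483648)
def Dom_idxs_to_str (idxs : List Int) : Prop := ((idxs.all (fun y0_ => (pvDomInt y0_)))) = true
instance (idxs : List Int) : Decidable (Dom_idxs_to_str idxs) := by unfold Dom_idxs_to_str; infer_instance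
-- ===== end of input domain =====

-- B replaces A's quadratic rescan-and-pop(0) loop with one linear pass building maximal
-- consecutive runs (objective: faster).

-- ===== PORT A =====
-- the inner 'for i in range(len(idxs)-1): if not consecutive: break; n_consecutive += 1'
def pvCountConsec : List Int → Nat
  | a :: b :: rest => if a + 1 ≠ b then 0 else pvCountConsec (b :: rest) + 1
  | _ => 0

-- the 'while len(idxs) > 0' loop; items are int ⊕ pair as in A.
-- idxs[n_consecutive] is ported as getD: the index is provably in range (pvCountConsec ≤ len-1).
def pvALoop : List Int → List (Int ⊕ (Int × Int)) → List (Int ⊕ (Int × Int))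
  | [], items => items
  | x :: rest, items =>
    let n := pvCountConsec (x :: rest)
    if n > 1 then
      pvALoop (List.drop (n + 1) (x :: rest)) (items ++ [Sum.inr (x, (x :: rest).getD n 0)])
    else
      pvALoop rest (items ++ [Sum.inl x])
termination_by ys _ => ys.length
decreasing_by
  all_goals simp only [List.length_drop, List.length_cons]
  all_goals omega

def idxs_to_str (idxs : List Int) : String :=
  let xs := PySem.List.sorted (idxs.map (fun x => x + 1)) (fun x => x) false
  let items := pvALoop xs []
  PySem.Str.join ","
    (items.map (fun it =>
      match it with
      | Sum.inl k => PySem.Int.toStr k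
      | Sum.inr (a, b) => PySem.Int.toStr a ++ "-" ++ PySem.Int.toStr b))

-- ===== PORT B =====
-- one step of B's first loop: extend the last run or start a new one
def pvAddRun (runs : List (Int × Int)) (v : Int) : List (Int × Int) :=
  match runs.getLast? with
  | some (a, b) => if b + 1 = v then runs.dropLast ++ [(a, v)] else runs ++ [(v, v)]
  | none => [(v, v)]

-- body of B's second loop: strings contributed by one run
def pvExpandRun (r : Int × Int) : List String :=
  if r.2 - r.1 ≥ 2 then [PySem.Int.toStr r.1 ++ "-" ++ PySem.Int.toStr r.2]
  else (PySem.List.pyRange r.1 (r.2 + 1) 1).map PySem.Int.toStr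

def idxs_to_str_alt (idxs : List Int) : String :=
  let xs := PySem.List.sorted (idxs.map (fun x => x + 1)) (fun x => x) false
  let runs := xs.foldl pvAddRun []
  PySem.Str.join "," (runs.flatMap pvExpandRun)

-- ===== PRECONDITION & SPEC =====
def Spec_idxs_to_str (idxs : List Int) (out : String) : Prop := out = idxs_to_str_alt idxs
instance (idxs : List Int) (out : String) : Decidable (Spec_idxs_to_str idxs out) := by unfold Spec_idxs_to_str; infer_instance

-- ===== CLAIM (what is proved, stated in full; the proofs are below) =====
def Claim_equal_idxs_to_str : Prop := ∀ (idxs : List Int), Dom_idxs_to_str idxs → Spec_idxs_to_str idxs (idxs_to_str idxs)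

-- ===== LEMMAS AND PROOFS =====

-- canonical maximal-run decomposition, built from the right
def pvGlue (v : Int) : List (Int × Int) → List (Int × Int)
  | (c, d) :: t => if v + 1 = c then (v, d) :: t else (v, v) :: (c, d) :: t
  | [] => [(v, v)]

def pvRuns : List Int → List (Int × Int)
  | [] => []
  | v :: ys => pvGlue v (pvRuns ys)

def pvExt (a b : Int) : List (Int × Int) → List (Int × Int)
  | (c, d) :: t => if b + 1 = c then (a, d) :: t else (a, b) :: (c, d) :: t
  | [] => [(a, b)]

-- items A accumulates for a given run decomposition
def pvItemsOf : List (Int × Int) → List (Int ⊕ (Int × Int))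
  | [] => []
  | (a, b) :: t =>
    (if b - a ≥ 2 then [Sum.inr (a, b)]
     else if a = b then [Sum.inl a] else [Sum.inl a, Sum.inl b]) ++ pvItemsOf t

theorem pvExt_glue_consec (a b v : Int) (R : List (Int × Int)) (h : b + 1 = v) :
    pvExt a b (pvGlue v R) = pvExt a v R := by
  cases R with
  | nil => simp [pvGlue, pvExt, h]
  | cons p t =>
    obtain ⟨c, d⟩ := p
    by_cases hc : v + 1 = c <;> simp [pvGlue, pvExt, hc, h]

theorem pvExt_glue_break (a b v : Int) (R : List (Int × Int)) (h : ¬ b + 1 = v) :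
    pvExt a b (pvGlue v R) = (a, b) :: pvExt v v R := by
  cases R with
  | nil => simp [pvGlue, pvExt, h]
  | cons p t =>
    obtain ⟨c, d⟩ := p
    by_cases hc : v + 1 = c <;> simp [pvGlue, pvExt, hc, h]

theorem pvFoldl_addRun (ys : List Int) : ∀ (rs : List (Int × Int)) (a b : Int),
    ys.foldl pvAddRun (rs ++ [(a, b)]) = rs ++ pvExt a b (pvRuns ys) := by
  induction ys with
  | nil => intro rs a b; simp [pvRuns, pvExt]
  | cons v ys ih =>
    intro rs a b
    have hlast : (rs ++ [(a, b)]).getLast? = some (a, b) := by simp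
    have hdl : (rs ++ [(a, b)]).dropLast = rs := by simp
    simp only [List.foldl_cons, pvAddRun, hlast, hdl]
    by_cases h : b + 1 = v
    · rw [if_pos h, ih rs a v, pvRuns, pvExt_glue_consec a b v _ h]
    · rw [if_neg h, ih (rs ++ [(a, b)]) v v, pvRuns, pvExt_glue_break a b v _ h]
      simp

theorem pvFoldl_eq_runs (ys : List Int) : ys.foldl pvAddRun [] = pvRuns ys := by
  cases ys with
  | nil => rfl
  | cons v ys =>
    have h0 : pvAddRun [] v = [(v, v)] := by simp [pvAddRun]
    have h2 := pvFoldl_addRun ys [] v v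
    simp only [List.nil_append] at h2
    simp only [List.foldl_cons, h0, h2, pvRuns]
    cases h : pvRuns ys with
    | nil => simp [pvExt, pvGlue]
    | cons p t =>
      obtain ⟨c, d⟩ := p
      by_cases hc : v + 1 = c <;> simp [pvExt, pvGlue, hc]

theorem pvCountConsec_getD (rest : List Int) : ∀ (x : Int),
    (x :: rest).getD (pvCountConsec (x :: rest)) 0 = x + pvCountConsec (x :: rest) := by
  induction rest with
  | nil => intro x; simp [pvCountConsec]
  | cons b t ih =>
    intro x
    by_cases h : x + 1 = b
    · have hcc : pvCountConsec (x :: b :: t) = pvCountConsec (b :: t) + 1 := by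
        simp [pvCountConsec, h]
      rw [hcc]
      have := ih b
      simp only [List.getD] at this ⊢
      push_cast
      simp only [List.getElem?_cons_succ]
      rw [show ((x : Int) + ((pvCountConsec (b :: t) : Int) + 1)) = b + pvCountConsec (b :: t) by omega]
      exact this
    · have hcc : pvCountConsec (x :: b :: t) = 0 := by simp [pvCountConsec, h]
      rw [hcc]; simp

theorem pvRuns_decomp (rest : List Int) : ∀ (x : Int),
    pvRuns (x :: rest) =
      (x, (x :: rest).getD (pvCountConsec (x :: rest)) 0) ::
        pvRuns (List.drop (pvCountConsec (x :: rest) + 1) (x :: rest)) := by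
  induction rest with
  | nil => intro x; simp [pvRuns, pvGlue, pvCountConsec]
  | cons b t ih =>
    intro x
    by_cases h : x + 1 = b
    · have hcc : pvCountConsec (x :: b :: t) = pvCountConsec (b :: t) + 1 := by
        simp [pvCountConsec, h]
      have hx : pvRuns (x :: b :: t) = pvGlue x (pvRuns (b :: t)) := rfl
      rw [hx, ih b, pvGlue, if_pos h, hcc]
      simp [List.getD]
    · have hcc : pvCountConsec (x :: b :: t) = 0 := by simp [pvCountConsec, h]
      have hb := ih b
      have hx : pvRuns (x :: b :: t) = pvGlue x (pvRuns (b :: t)) := rfl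
      rw [hx, hb]
      by_cases h2 : x + 1 = b
      · exact absurd h2 h
      · simp only [pvGlue, if_neg h, hcc]
        rw [← hb]
        simp [List.getD]

theorem pvRuns_le (ys : List Int) : ∀ p ∈ pvRuns ys, p.1 ≤ p.2 := by
  induction ys with
  | nil => intro p hp; simp [pvRuns] at hp
  | cons v ys ih =>
    intro p hp
    simp only [pvRuns] at hp
    cases h : pvRuns ys with
    | nil => rw [h] at hp; simp [pvGlue] at hp; simp [hp]
    | cons q t =>
      obtain ⟨c, d⟩ := q
      rw [h] at hp
      have hcd : c ≤ d := ih (c, d) (by rw [h]; simp)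
      by_cases hc : v + 1 = c
      · rw [pvGlue, if_pos hc] at hp
        rcases List.mem_cons.mp hp with rfl | hm
        · simp; omega
        · exact ih p (by rw [h]; exact List.mem_cons_of_mem _ hm)
      · rw [pvGlue, if_neg hc] at hp
        rcases List.mem_cons.mp hp with rfl | hm
        · simp
        · exact ih p (by rw [h]; exact hm)

theorem pvALoop_eq (ys : List Int) (items : List (Int ⊕ (Int × Int))) :
    pvALoop ys items = items ++ pvItemsOf (pvRuns ys) := by
  induction ys, items using pvALoop.induct with
  | case1 items => simp [pvALoop, pvRuns, pvItemsOf]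
  | case2 x rest items n hn ih =>
    have hne : n = pvCountConsec (x :: rest) := rfl
    rw [hne] at hn ih
    rw [pvALoop]
    rw [if_pos hn, ih, pvRuns_decomp rest x, pvItemsOf, pvCountConsec_getD rest x]
    have hge : ((x + (pvCountConsec (x :: rest) : Int)) - x ≥ 2) := by
      have : (1 : Int) < pvCountConsec (x :: rest) := by exact_mod_cast hn
      omega
    rw [if_pos hge]
    simp
  | case3 x rest items n hn ih =>
    have hne : n = pvCountConsec (x :: rest) := rfl
    rw [hne] at hn
    rw [pvALoop]
    rw [if_neg hn, ih, pvRuns_decomp rest x, pvItemsOf, pvCountConsec_getD rest x]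
    have hn01 : pvCountConsec (x :: rest) = 0 ∨ pvCountConsec (x :: rest) = 1 := by omega
    rcases hn01 with h0 | h1
    · rw [h0]
      simp
    · -- n = 1: rest = b :: t with b = x + 1 and pvCountConsec (b :: t) = 0
      cases rest with
      | nil => simp [pvCountConsec] at h1
      | cons b t =>
        have hxb : x + 1 = b := by
          by_contra hne2
          simp [pvCountConsec, hne2] at h1
        have hbt : pvCountConsec (b :: t) = 0 := by
          simp [pvCountConsec, hxb] at h1
          omega
        rw [h1]
        simp only [Nat.cast_one]
        rw [if_neg (by omega), if_neg (by omega)]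
        rw [pvRuns_decomp t b, pvItemsOf, pvCountConsec_getD t b, hbt]
        simp [← hxb]

theorem pvItems_strings (rs : List (Int × Int)) (hle : ∀ p ∈ rs, p.1 ≤ p.2) :
    (pvItemsOf rs).map (fun it =>
      match it with
      | Sum.inl k => PySem.Int.toStr k
      | Sum.inr (a, b) => PySem.Int.toStr a ++ "-" ++ PySem.Int.toStr b)
      = rs.flatMap pvExpandRun := by
  induction rs with
  | nil => simp [pvItemsOf]
  | cons p t ih =>
    obtain ⟨a, b⟩ := p
    have hab : a ≤ b := hle (a, b) (by simp)
    have iht := ih (fun q hq => hle q (List.mem_cons_of_mem _ hq))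
    rw [pvItemsOf, List.flatMap_cons, List.map_append, iht]
    by_cases h2 : b - a ≥ 2
    · rw [if_pos h2]
      simp [pvExpandRun, h2]
    · rw [if_neg h2]
      by_cases heq : a = b
      · rw [if_pos heq]
        subst heq
        simp [pvExpandRun, PySem.List.pyRange_one_singleton]
      · rw [if_neg heq]
        have hb : b = a + 1 := by omega
        subst hb
        simp only [pvExpandRun]
        rw [if_neg (by omega : ¬ (a + 1 - a ≥ 2))]
        rw [PySem.List.pyRange_one_cons (by omega), PySem.List.pyRange_one_singleton]
        simp

-- ===== VERDICT (by name: the statement is the Claim_ definition above) =====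
theorem idxs_to_str_spec : Claim_equal_idxs_to_str := by
  intro idxs _
  unfold Spec_idxs_to_str idxs_to_str idxs_to_str_alt
  simp only
  rw [pvFoldl_eq_runs, pvALoop_eq, List.nil_append,
      pvItems_strings _ (pvRuns_le _)]
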